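-- pv_equiv track=rewrite | github.com/Hassu083/advent-of-code-2024 | Day_14.py | useful_function
-- ===== SOURCE A (Python) =====
-- def useful_function(quadrant):
--     m, n = len(quadrant), len(quadrant[0])
--     missX, missy = m//2, n//2
--     q1, q2, q3, q4 = 0, 0, 0, 0
--     for i in range(m):
--         for j in range(n):
--             if i == missX or j == missy: continue
--             elif i < missX and j < missy:
--                 q1 += quadrant[i][j]
--             elif i > missX and j < missy:
--                 q2 += quadrant[i][j]
--             elif i < missX and j > missy:
--                 q3 += quadrant[i][j]
--             else:
--                 q4 += quadrant[i][j]
--     return q1 * q2 * q3 * q4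
-- ===== SOURCE B (Python) =====
-- def useful_function(quadrant):
--     m, n = len(quadrant), len(quadrant[0])
--     missX, missy = m // 2, n // 2
--     # summed-area style prefix table down the rows: P[i] holds, for the first i
--     # rows, the cumulative sums of row[:missy], row[:missy+1] and row[:n]
--     P = [(0, 0, 0)]
--     a = b = c = 0
--     for row in quadrant:
--         a += sum(row[:missy])
--         b += sum(row[:missy + 1])
--         c += sum(row[:n])
--         P.append((a, b, c))
--     q1 = P[missX][0]
--     q2 = P[m][0] - P[missX + 1][0]
--     q3 = P[missX][2] - P[missX][1]
--     q4 = (P[m][2] - P[m][1]) - (P[missX + 1][2] - P[missX + 1][1])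
--     return q1 * q2 * q3 * q4
-- ===== Notes on version B (the rewrite author's own statement) =====
-- stated objective: alternative
-- what changed: Replaces A's per-cell double loop with nested if/elif classification by a summed-area-style prefix table built in one pass down the rows (cumulative sums of row[:missy], row[:missy+1], row[:n]); each quadrant sum is then read off as a difference of two table entries, the middle row and column cancelling in the subtraction.
import Mathlib
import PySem

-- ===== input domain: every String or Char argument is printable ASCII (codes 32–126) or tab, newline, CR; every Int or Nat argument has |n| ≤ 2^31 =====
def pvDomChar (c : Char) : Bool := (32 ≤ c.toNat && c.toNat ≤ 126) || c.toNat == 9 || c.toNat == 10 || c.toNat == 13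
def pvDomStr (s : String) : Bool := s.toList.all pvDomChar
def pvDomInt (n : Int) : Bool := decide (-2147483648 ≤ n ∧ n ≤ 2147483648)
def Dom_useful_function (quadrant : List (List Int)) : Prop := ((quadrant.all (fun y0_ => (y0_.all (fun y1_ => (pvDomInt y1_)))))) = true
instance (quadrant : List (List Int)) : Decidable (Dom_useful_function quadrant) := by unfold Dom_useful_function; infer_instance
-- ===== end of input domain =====

-- B replaces A's per-cell double loop with nested if/elif classification by a summed-area-style
-- prefix table built in one pass down the rows; each quadrant sum is a difference of two table
-- entries (objective: alternative algorithm, same cost).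

-- ===== PORT A =====
-- inner loop 'for j in range(n): …' of A, for a fixed row index i; state = (q1, q2, q3, q4)
def pvInnerA (quadrant : List (List Int)) (missX missy n : Int)
    (st : Int × Int × Int × Int) (i : Int) : Int × Int × Int × Int :=
  (PySem.List.pyRange 0 n 1).foldl (fun st j =>
    if i = missX ∨ j = missy then st
    else if i < missX ∧ j < missy then
      (st.1 + PySem.List.pyGetD (PySem.List.pyGetD quadrant i []) j 0, st.2.1, st.2.2.1, st.2.2.2)
    else if i > missX ∧ j < missy then
      (st.1, st.2.1 + PySem.List.pyGetD (PySem.List.pyGetD quadrant i []) j 0, st.2.2.1, st.2.2.2)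
    else if i < missX ∧ j > missy then
      (st.1, st.2.1, st.2.2.1 + PySem.List.pyGetD (PySem.List.pyGetD quadrant i []) j 0, st.2.2.2)
    else
      (st.1, st.2.1, st.2.2.1, st.2.2.2 + PySem.List.pyGetD (PySem.List.pyGetD quadrant i []) j 0)) st

def useful_function (quadrant : List (List Int)) : Int :=
  let m : Int := quadrant.length
  let n : Int := (quadrant.headD []).length   -- quadrant[0]; Pre_ guarantees quadrant ≠ []
  let missX : Int := PySem.Int.floordiv m 2
  let missy : Int := PySem.Int.floordiv n 2
  let st := (PySem.List.pyRange 0 m 1).foldl (pvInnerA quadrant missX missy n) (0, 0, 0, 0)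
  st.1 * st.2.1 * st.2.2.1 * st.2.2.2

-- ===== PORT B =====
-- one pass down the rows builds the prefix table P (Python's list append = ++ [·]);
-- then four reads of P give the quadrant sums as differences
def useful_function_alt (quadrant : List (List Int)) : Int :=
  let m : Int := quadrant.length
  let n : Int := (quadrant.headD []).length   -- quadrant[0]; Pre_ guarantees quadrant ≠ []
  let missX : Int := PySem.Int.floordiv m 2
  let missy : Int := PySem.Int.floordiv n 2
  let st := quadrant.foldl (fun (st : List (Int × Int × Int) × Int × Int × Int) row =>
      let a := st.2.1 + (PySem.List.slice row none (some missy)).sum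
      let b := st.2.2.1 + (PySem.List.slice row none (some (missy + 1))).sum
      let c := st.2.2.2 + (PySem.List.slice row none (some n)).sum
      (st.1 ++ [(a, b, c)], a, b, c))
    ([((0 : Int), (0 : Int), (0 : Int))], 0, 0, 0)
  let P := st.1
  let d : Int × Int × Int := (0, 0, 0)
  let q1 := (PySem.List.pyGetD P missX d).1
  let q2 := (PySem.List.pyGetD P m d).1 - (PySem.List.pyGetD P (missX + 1) d).1
  let q3 := (PySem.List.pyGetD P missX d).2.2 - (PySem.List.pyGetD P missX d).2.1
  let q4 := ((PySem.List.pyGetD P m d).2.2 - (PySem.List.pyGetD P m d).2.1)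
          - ((PySem.List.pyGetD P (missX + 1) d).2.2 - (PySem.List.pyGetD P (missX + 1) d).2.1)
  q1 * q2 * q3 * q4

-- ===== PRECONDITION & SPEC =====
-- Pre_ excludes exactly the inputs on which A raises IndexError: the empty grid (quadrant[0]),
-- and grids where some row other than the middle row m//2 is shorter than the largest column
-- index A reads (n-1, or n-2 when the skipped middle column n//2 is the last column).
def Pre_useful_function (quadrant : List (List Int)) : Prop :=
  quadrant ≠ [] ∧ ∀ pr ∈ quadrant.zipIdx, pr.2 = quadrant.length / 2 ∨
    (if (quadrant.headD []).length / 2 = (quadrant.headD []).length - 1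
      then (quadrant.headD []).length - 1 else (quadrant.headD []).length) ≤ pr.1.length
instance (quadrant : List (List Int)) : Decidable (Pre_useful_function quadrant) := by
  unfold Pre_useful_function; infer_instance

def pvWitness_useful_function : List (List Int) := [[1, 2], [3, 4], [5, 6]]

def Spec_useful_function (quadrant : List (List Int)) (out : Int) : Prop := out = useful_function_alt quadrant
instance (quadrant : List (List Int)) (out : Int) : Decidable (Spec_useful_function quadrant out) := by unfold Spec_useful_function; infer_instance

-- ===== CLAIM (what is proved, stated in full; the proofs are below) =====
def Claim_equal_useful_function : Prop := ∀ (quadrant : List (List Int)), Dom_useful_function quadrant → Pre_useful_function quadrant → Spec_useful_function quadrant (useful_function quadrant)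

-- ===== LEMMAS AND PROOFS =====

theorem pv_floordiv_two (m : Int) : PySem.Int.floordiv m 2 = m / 2 := by
  rw [PySem.Int.floordiv, Int.fdiv_eq_ediv]; simp

-- componentwise evaluation of folds that add to fixed components of the 4-tuple state
theorem pv_foldl_c1 (g : Int → Int) (l : List Int) : ∀ st : Int × Int × Int × Int,
    l.foldl (fun st j => (st.1 + g j, st.2.1, st.2.2.1, st.2.2.2)) st
      = (st.1 + (l.map g).sum, st.2.1, st.2.2.1, st.2.2.2) := by
  induction l with
  | nil => simp
  | cons x xs ih => intro st; simp [ih]; ring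

theorem pv_foldl_c2 (g : Int → Int) (l : List Int) : ∀ st : Int × Int × Int × Int,
    l.foldl (fun st j => (st.1, st.2.1 + g j, st.2.2.1, st.2.2.2)) st
      = (st.1, st.2.1 + (l.map g).sum, st.2.2.1, st.2.2.2) := by
  induction l with
  | nil => simp
  | cons x xs ih => intro st; simp [ih]; ring

theorem pv_foldl_c3 (g : Int → Int) (l : List Int) : ∀ st : Int × Int × Int × Int,
    l.foldl (fun st j => (st.1, st.2.1, st.2.2.1 + g j, st.2.2.2)) st
      = (st.1, st.2.1, st.2.2.1 + (l.map g).sum, st.2.2.2) := by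
  induction l with
  | nil => simp
  | cons x xs ih => intro st; simp [ih]; ring

theorem pv_foldl_c4 (g : Int → Int) (l : List Int) : ∀ st : Int × Int × Int × Int,
    l.foldl (fun st j => (st.1, st.2.1, st.2.2.1, st.2.2.2 + g j)) st
      = (st.1, st.2.1, st.2.2.1, st.2.2.2 + (l.map g).sum) := by
  induction l with
  | nil => simp
  | cons x xs ih => intro st; simp [ih]; ring

theorem pv_foldl_c13 (L R : Int → Int) (l : List Int) : ∀ st : Int × Int × Int × Int,
    l.foldl (fun st i => (st.1 + L i, st.2.1, st.2.2.1 + R i, st.2.2.2)) st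
      = (st.1 + (l.map L).sum, st.2.1, st.2.2.1 + (l.map R).sum, st.2.2.2) := by
  induction l with
  | nil => simp
  | cons x xs ih => intro st; simp [ih]; constructor <;> ring

theorem pv_foldl_c24 (L R : Int → Int) (l : List Int) : ∀ st : Int × Int × Int × Int,
    l.foldl (fun st i => (st.1, st.2.1 + L i, st.2.2.1, st.2.2.2 + R i)) st
      = (st.1, st.2.1 + (l.map L).sum, st.2.2.1, st.2.2.2 + (l.map R).sum) := by
  induction l with
  | nil => simp
  | cons x xs ih => intro st; simp [ih]; constructor <;> ring

theorem pv_foldl_id {α β : Type} (l : List α) (st : β) :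
    l.foldl (fun s _ => s) st = st := by
  induction l generalizing st with
  | nil => rfl
  | cons x xs ih => exact ih st

-- the values A reads on a column segment [a, b) of a row are the drop/take segment of the row
theorem pv_map_seg {α : Type} (xs : List α) (d : α) (a b : Int)
    (h0 : 0 ≤ a) (hb : b ≤ (xs.length : Int) ∨ b ≤ a) :
    (PySem.List.pyRange a b 1).map (fun j => PySem.List.pyGetD xs j d)
      = (xs.drop a.toNat).take (b - a).toNat := by
  apply List.ext_getElem
  · simp [PySem.List.length_pyRange_one]; omega
  · intro k h1 h2
    have hk : (k : Int) < b - a := by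
      have := h1; simp [PySem.List.length_pyRange_one] at this; omega
    have hlen : a.toNat + k < xs.length := by
      have := h2; simp at this; omega
    simp only [List.getElem_map, PySem.List.getElem_pyRange_one, List.getElem_take,
      List.getElem_drop]
    rw [PySem.List.pyGetD_eq_getElem xs d (by omega) (by omega)]
    simp only [show (a + (k : Int)).toNat = a.toNat + k from by omega]

-- generic shape of A's inner loop: skip the middle column, one action below it, another above it
theorem pv_inner_split {St : Type} (f g1 g2 : St → Int → St) (missy n : Int) (st : St)
    (hy0 : 0 ≤ missy) (hy : missy < n)
    (hmid : ∀ st, f st missy = st)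
    (hlo : ∀ (st : St) (j : Int), 0 ≤ j → j < missy → f st j = g1 st j)
    (hhi : ∀ (st : St) (j : Int), missy < j → j < n → f st j = g2 st j) :
    (PySem.List.pyRange 0 n 1).foldl f st
      = (PySem.List.pyRange (missy + 1) n 1).foldl g2 ((PySem.List.pyRange 0 missy 1).foldl g1 st) := by
  have hA : ∀ init : St, (PySem.List.pyRange (missy + 1) n 1).foldl f init
      = (PySem.List.pyRange (missy + 1) n 1).foldl g2 init := by
    intro init
    apply PySem.List.foldl_congr_mem
    intro acc x hx
    rw [PySem.List.mem_pyRange_one] at hx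
    exact hhi acc x (by omega) hx.2
  have hB : (PySem.List.pyRange 0 missy 1).foldl f st
      = (PySem.List.pyRange 0 missy 1).foldl g1 st := by
    apply PySem.List.foldl_congr_mem
    intro acc x hx
    rw [PySem.List.mem_pyRange_one] at hx
    exact hlo acc x hx.1 hx.2
  rw [PySem.List.pyRange_one_append 0 missy n hy0 (le_of_lt hy),
      PySem.List.pyRange_one_cons hy, List.foldl_append, List.foldl_cons, hmid, hA, hB]

theorem pv_inner_lt (quadrant : List (List Int)) (missX missy n i : Int)
    (hi : i < missX) (hy0 : 0 ≤ missy) (hy : missy < n)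
    (hp : missy ≤ ((PySem.List.pyGetD quadrant i []).length : Int))
    (hs : n ≤ ((PySem.List.pyGetD quadrant i []).length : Int) ∨ missy + 1 = n)
    (st : Int × Int × Int × Int) :
    pvInnerA quadrant missX missy n st i
      = (st.1 + ((PySem.List.pyGetD quadrant i []).take missy.toNat).sum, st.2.1,
         st.2.2.1 + (((PySem.List.pyGetD quadrant i []).drop (missy + 1).toNat).take
           (n - (missy + 1)).toNat).sum, st.2.2.2) := by
  unfold pvInnerA
  rw [pv_inner_split _
        (fun (st : Int × Int × Int × Int) j =>
          (st.1 + PySem.List.pyGetD (PySem.List.pyGetD quadrant i []) j 0, st.2.1, st.2.2.1, st.2.2.2))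
        (fun (st : Int × Int × Int × Int) j =>
          (st.1, st.2.1, st.2.2.1 + PySem.List.pyGetD (PySem.List.pyGetD quadrant i []) j 0, st.2.2.2))
        missy n st hy0 hy
        (by intro st; simp)
        (by intro st j h0 hjy; split_ifs with h1 h2 h3 h4 <;> first | rfl | omega)
        (by intro st j hjy hjn; split_ifs with h1 h2 h3 h4 <;> first | rfl | omega)]
  have m1 : (PySem.List.pyRange 0 missy 1).map
      (fun j => PySem.List.pyGetD (PySem.List.pyGetD quadrant i []) j 0)
      = (PySem.List.pyGetD quadrant i []).take missy.toNat := by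
    have := pv_map_seg (PySem.List.pyGetD quadrant i []) 0 0 missy (le_refl 0) (Or.inl hp)
    simp at this
    exact this
  have m2 : (PySem.List.pyRange (missy + 1) n 1).map
      (fun j => PySem.List.pyGetD (PySem.List.pyGetD quadrant i []) j 0)
      = ((PySem.List.pyGetD quadrant i []).drop (missy + 1).toNat).take (n - (missy + 1)).toNat :=
    pv_map_seg (PySem.List.pyGetD quadrant i []) 0 (missy + 1) n (by omega) (by omega)
  rw [pv_foldl_c1, pv_foldl_c3, m1, m2]

theorem pv_inner_gt (quadrant : List (List Int)) (missX missy n i : Int)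
    (hi : missX < i) (hy0 : 0 ≤ missy) (hy : missy < n)
    (hp : missy ≤ ((PySem.List.pyGetD quadrant i []).length : Int))
    (hs : n ≤ ((PySem.List.pyGetD quadrant i []).length : Int) ∨ missy + 1 = n)
    (st : Int × Int × Int × Int) :
    pvInnerA quadrant missX missy n st i
      = (st.1, st.2.1 + ((PySem.List.pyGetD quadrant i []).take missy.toNat).sum,
         st.2.2.1, st.2.2.2 + (((PySem.List.pyGetD quadrant i []).drop (missy + 1).toNat).take
           (n - (missy + 1)).toNat).sum) := by
  unfold pvInnerA
  rw [pv_inner_split _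
        (fun (st : Int × Int × Int × Int) j =>
          (st.1, st.2.1 + PySem.List.pyGetD (PySem.List.pyGetD quadrant i []) j 0, st.2.2.1, st.2.2.2))
        (fun (st : Int × Int × Int × Int) j =>
          (st.1, st.2.1, st.2.2.1, st.2.2.2 + PySem.List.pyGetD (PySem.List.pyGetD quadrant i []) j 0))
        missy n st hy0 hy
        (by intro st; simp)
        (by intro st j h0 hjy; split_ifs with h1 h2 h3 h4 <;> first | rfl | omega)
        (by intro st j hjy hjn; split_ifs with h1 h2 h3 h4 <;> first | rfl | omega)]
  have m1 : (PySem.List.pyRange 0 missy 1).map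
      (fun j => PySem.List.pyGetD (PySem.List.pyGetD quadrant i []) j 0)
      = (PySem.List.pyGetD quadrant i []).take missy.toNat := by
    have := pv_map_seg (PySem.List.pyGetD quadrant i []) 0 0 missy (le_refl 0) (Or.inl hp)
    simp at this
    exact this
  have m2 : (PySem.List.pyRange (missy + 1) n 1).map
      (fun j => PySem.List.pyGetD (PySem.List.pyGetD quadrant i []) j 0)
      = ((PySem.List.pyGetD quadrant i []).drop (missy + 1).toNat).take (n - (missy + 1)).toNat :=
    pv_map_seg (PySem.List.pyGetD quadrant i []) 0 (missy + 1) n (by omega) (by omega)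
  rw [pv_foldl_c2, pv_foldl_c4, m1, m2]

theorem pv_inner_eq (quadrant : List (List Int)) (missX missy n : Int) (st : Int × Int × Int × Int) :
    pvInnerA quadrant missX missy n st missX = st := by
  unfold pvInnerA
  refine Eq.trans ?_ (pv_foldl_id (PySem.List.pyRange 0 n 1) st)
  apply PySem.List.foldl_congr_mem
  intro acc x _
  simp

-- ----- B-side lemmas: the prefix table -----

-- the list of table entries B's loop appends, from a starting cumulative state (a, b, c)
def pvScanB (y n : Int) : List (List Int) → Int → Int → Int → List (Int × Int × Int)
  | [], _, _, _ => []
  | r :: rs, a, b, c =>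
    (a + (PySem.List.slice r none (some y)).sum,
     b + (PySem.List.slice r none (some (y + 1))).sum,
     c + (PySem.List.slice r none (some n)).sum)
    :: pvScanB y n rs (a + (PySem.List.slice r none (some y)).sum)
        (b + (PySem.List.slice r none (some (y + 1))).sum)
        (c + (PySem.List.slice r none (some n)).sum)

theorem pv_fold_table (y n : Int) (rows : List (List Int)) :
    ∀ (P0 : List (Int × Int × Int)) (a b c : Int),
    (rows.foldl (fun (st : List (Int × Int × Int) × Int × Int × Int) row =>
      let a := st.2.1 + (PySem.List.slice row none (some y)).sum
      let b := st.2.2.1 + (PySem.List.slice row none (some (y + 1))).sum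
      let c := st.2.2.2 + (PySem.List.slice row none (some n)).sum
      (st.1 ++ [(a, b, c)], a, b, c)) (P0, a, b, c)).1
    = P0 ++ pvScanB y n rows a b c := by
  induction rows with
  | nil => intro P0 a b c; simp [pvScanB]
  | cons r rs ih =>
    intro P0 a b c
    simp only [List.foldl_cons]
    rw [ih]
    simp [pvScanB]

theorem pv_scan_get (y n : Int) (rows : List (List Int)) :
    ∀ (a b c : Int) (i : Nat), i ≤ rows.length →
    ((a, b, c) :: pvScanB y n rows a b c)[i]? = some
      (a + ((rows.take i).map (fun r => (PySem.List.slice r none (some y)).sum)).sum,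
       b + ((rows.take i).map (fun r => (PySem.List.slice r none (some (y + 1))).sum)).sum,
       c + ((rows.take i).map (fun r => (PySem.List.slice r none (some n)).sum)).sum) := by
  induction rows with
  | nil =>
    intro a b c i hi
    have : i = 0 := by simpa using hi
    subst this
    simp [pvScanB]
  | cons r rs ih =>
    intro a b c i hi
    cases i with
    | zero => simp [pvScanB]
    | succ k =>
      have hk : k ≤ rs.length := by simpa using hi
      simp only [pvScanB, List.getElem?_cons_succ]
      rw [ih _ _ _ k hk]
      simp only [List.take_succ_cons, List.map_cons, List.sum_cons, Option.some.injEq,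
        Prod.mk.injEq]
      refine ⟨by ring, by ring, by ring⟩

theorem pv_sum_map_sub {α : Type} (l : List α) (f g : α → Int) :
    (l.map f).sum - (l.map g).sum = (l.map (fun x => f x - g x)).sum := by
  induction l with
  | nil => simp
  | cons x xs ih => simp [← ih]; ring

theorem pv_sum_drop {α : Type} (l : List α) (f : α → Int) (k : Nat) :
    (l.map f).sum - ((l.take k).map f).sum = ((l.drop k).map f).sum := by
  nth_rewrite 1 [← List.take_append_drop k l]
  rw [List.map_append, List.sum_append]
  ring

theorem pv_scan_length (y n : Int) (rows : List (List Int)) :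
    ∀ a b c : Int, (pvScanB y n rows a b c).length = rows.length := by
  induction rows with
  | nil => intro a b c; simp [pvScanB]
  | cons r rs ih => intro a b c; simp [pvScanB, ih]

-- evaluate B's result as the four region sums (no precondition: slices clamp)
theorem pv_alt_eval (quadrant : List (List Int)) (hm : quadrant ≠ []) :
    useful_function_alt quadrant =
      (((quadrant.take ((quadrant.length : Int) / 2).toNat).map
          (fun r => (PySem.List.slice r none (some (((quadrant.headD []).length : Int) / 2))).sum)).sum)
      * (((quadrant.drop (((quadrant.length : Int) / 2) + 1).toNat).map
          (fun r => (PySem.List.slice r none (some (((quadrant.headD []).length : Int) / 2))).sum)).sum)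
      * (((quadrant.take ((quadrant.length : Int) / 2).toNat).map
          (fun r => (PySem.List.slice r none (some ((quadrant.headD []).length : Int))).sum
                  - (PySem.List.slice r none (some ((((quadrant.headD []).length : Int) / 2) + 1))).sum)).sum)
      * (((quadrant.drop (((quadrant.length : Int) / 2) + 1).toNat).map
          (fun r => (PySem.List.slice r none (some ((quadrant.headD []).length : Int))).sum
                  - (PySem.List.slice r none (some ((((quadrant.headD []).length : Int) / 2) + 1))).sum)).sum) := by
  have hm1 : 0 < quadrant.length := List.length_pos_of_ne_nil hm
  unfold useful_function_alt
  simp only [pv_floordiv_two]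
  set y : Int := ((quadrant.headD []).length : Int) / 2 with hy
  set n : Int := ((quadrant.headD []).length : Int) with hn
  set X : Int := (quadrant.length : Int) / 2 with hX
  rw [pv_fold_table]
  have hP : ∀ (i : Int), 0 ≤ i → i ≤ (quadrant.length : Int) →
      PySem.List.pyGetD ([((0:Int),(0:Int),(0:Int))] ++ pvScanB y n quadrant 0 0 0) i (0, 0, 0)
        = (((quadrant.take i.toNat).map (fun r => (PySem.List.slice r none (some y)).sum)).sum,
           ((quadrant.take i.toNat).map (fun r => (PySem.List.slice r none (some (y + 1))).sum)).sum,
           ((quadrant.take i.toNat).map (fun r => (PySem.List.slice r none (some n)).sum)).sum) := by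
    intro i h0 h1
    have hget := pv_scan_get y n quadrant 0 0 0 i.toNat (by omega)
    have hsl : (pvScanB y n quadrant 0 0 0).length = quadrant.length :=
      pv_scan_length y n quadrant 0 0 0
    have hlt : i < (([((0:Int),(0:Int),(0:Int))] ++ pvScanB y n quadrant 0 0 0).length : Int) := by
      simp [hsl]; omega
    rw [PySem.List.pyGetD_eq_getElem _ _ h0 hlt]
    have hc : ([((0:Int),(0:Int),(0:Int))] ++ pvScanB y n quadrant 0 0 0)
        = ((0:Int),(0:Int),(0:Int)) :: pvScanB y n quadrant 0 0 0 := by simp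
    have hlt' : i.toNat < (((0:Int),(0:Int),(0:Int)) :: pvScanB y n quadrant 0 0 0).length := by
      simp [hsl]; omega
    have h2 := (List.getElem?_eq_getElem hlt').symm.trans hget
    simp only [hc]
    simpa using Option.some.inj h2
  rw [hP X (by omega) (by omega), hP ((quadrant.length : Int)) (by omega) (by omega),
      hP (X + 1) (by omega) (by omega)]
  have htakeall : quadrant.take ((quadrant.length : Int)).toNat = quadrant := by
    simp
  simp only [htakeall]
  rw [show ((quadrant.map (fun r => (PySem.List.slice r none (some y)).sum)).sum
      - ((quadrant.take (X + 1).toNat).map (fun r => (PySem.List.slice r none (some y)).sum)).sum)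
      = ((quadrant.drop (X + 1).toNat).map (fun r => (PySem.List.slice r none (some y)).sum)).sum
    from pv_sum_drop quadrant _ (X + 1).toNat]
  have h3 : ∀ l : List (List Int),
      ((l.map (fun r => (PySem.List.slice r none (some n)).sum)).sum
        - (l.map (fun r => (PySem.List.slice r none (some (y + 1))).sum)).sum)
      = (l.map (fun r => (PySem.List.slice r none (some n)).sum
          - (PySem.List.slice r none (some (y + 1))).sum)).sum := fun l => pv_sum_map_sub l _ _
  rw [h3]
  have h4 : ((quadrant.map (fun r => (PySem.List.slice r none (some n)).sum)).sum
        - (quadrant.map (fun r => (PySem.List.slice r none (some (y + 1))).sum)).sum)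
      - (((quadrant.take (X + 1).toNat).map (fun r => (PySem.List.slice r none (some n)).sum)).sum
        - ((quadrant.take (X + 1).toNat).map (fun r => (PySem.List.slice r none (some (y + 1))).sum)).sum)
      = ((quadrant.drop (X + 1).toNat).map (fun r => (PySem.List.slice r none (some n)).sum
          - (PySem.List.slice r none (some (y + 1))).sum)).sum := by
    rw [← h3 (quadrant.drop (X + 1).toNat)]
    have a1 := pv_sum_drop quadrant (fun r => (PySem.List.slice r none (some n)).sum) (X + 1).toNat
    have a2 := pv_sum_drop quadrant (fun r => (PySem.List.slice r none (some (y + 1))).sum) (X + 1).toNat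
    omega
  rw [h4]

-- per-row bridge: clamped slice differences are exactly the segments A sums
theorem pv_row_left (r : List Int) (y : Int) (h0 : 0 ≤ y) :
    (PySem.List.slice r none (some y)).sum = (r.take y.toNat).sum := by
  rw [PySem.List.slice_to _ h0]

theorem pv_row_right (r : List Int) (y n : Int) (h0 : 0 ≤ y) (h : y + 1 ≤ n) :
    (PySem.List.slice r none (some n)).sum - (PySem.List.slice r none (some (y + 1))).sum
      = ((r.drop (y + 1).toNat).take (n - (y + 1)).toNat).sum := by
  rw [PySem.List.slice_to _ (by omega), PySem.List.slice_to _ (by omega)]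
  have hsplit : r.take n.toNat = r.take (y + 1).toNat ++ (r.drop (y + 1).toNat).take (n - (y + 1)).toNat := by
    rw [show n.toNat = (y + 1).toNat + (n - (y + 1)).toNat from by omega]
    exact List.take_add ..
  rw [hsplit]
  simp

-- ===== VERDICT (by name: the statement is the Claim_ definition above) =====
theorem useful_function_spec : Claim_equal_useful_function := by
  intro quadrant _ hpre
  obtain ⟨hne, hallrows⟩ := hpre
  have hm1 : 0 < quadrant.length := List.length_pos_of_ne_nil hne
  unfold Spec_useful_function
  rw [pv_alt_eval quadrant hne]
  unfold useful_function
  simp only [pv_floordiv_two]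
  by_cases hn0 : (quadrant.headD []).length = 0
  · -- width 0: every quadrant sum is empty on both sides
    have hz : ∀ (st : Int × Int × Int × Int) (i : Int),
        pvInnerA quadrant ((quadrant.length : Int) / 2) (((quadrant.headD []).length : Int) / 2)
          ((quadrant.headD []).length : Int) st i = st := by
      intro st i
      unfold pvInnerA
      rw [PySem.List.pyRange_one_eq_nil (by rw [hn0]; norm_num)]
      rfl
    have hA : (PySem.List.pyRange 0 (quadrant.length : Int) 1).foldl
        (pvInnerA quadrant ((quadrant.length : Int) / 2) (((quadrant.headD []).length : Int) / 2)
          ((quadrant.headD []).length : Int))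
        ((0 : Int), (0 : Int), (0 : Int), (0 : Int))
        = ((0 : Int), (0 : Int), (0 : Int), (0 : Int)) := by
      refine Eq.trans ?_ (pv_foldl_id (PySem.List.pyRange 0 (quadrant.length : Int) 1) _)
      apply PySem.List.foldl_congr_mem
      intro acc x _
      exact hz acc x
    rw [hA]
    have hy0 : (((quadrant.headD []).length : Int)) / 2 = 0 := by omega
    have e1 : ∀ r : List Int,
        PySem.List.slice r none (some ((((quadrant.headD []).length : Int)) / 2)) = ([] : List Int) := by
      intro r
      rw [hy0, PySem.List.slice_to _ le_rfl]
      simp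
    have z1 : ∀ l : List (List Int), (l.map (fun _ => (0 : Int))).sum = 0 := by
      intro l
      induction l with
      | nil => simp
      | cons x xs ih => simp
    simp only [e1, List.sum_nil, z1]
    simp
  · -- width ≥ 1: classify rows below / at / above the middle row
    have hrow : ∀ i : Int, 0 ≤ i → i < (quadrant.length : Int) → ¬ i = (quadrant.length : Int) / 2 →
        ((quadrant.headD []).length : Int) / 2 ≤ ((PySem.List.pyGetD quadrant i []).length : Int) ∧
        (((quadrant.headD []).length : Int) ≤ ((PySem.List.pyGetD quadrant i []).length : Int) ∨
          ((quadrant.headD []).length : Int) / 2 + 1 = ((quadrant.headD []).length : Int)) := by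
      intro i h0 h1 hnmid
      rw [PySem.List.pyGetD_eq_getElem quadrant [] h0 (by exact_mod_cast h1)]
      have hidx : i.toNat < quadrant.length := by omega
      have hmem : (quadrant[i.toNat], i.toNat) ∈ quadrant.zipIdx := by
        have he : quadrant.zipIdx[i.toNat]'(by simpa using hidx) = (quadrant[i.toNat], i.toNat) := by
          simp [List.getElem_zipIdx]
        rw [← he]
        exact List.getElem_mem _
      have h' := hallrows _ hmem
      dsimp only at h'
      rcases h' with h | h
      · omega
      · by_cases hs : (quadrant.headD []).length / 2 = (quadrant.headD []).length - 1
        · rw [if_pos hs] at h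
          omega
        · rw [if_neg hs] at h
          omega
    have hpref : (PySem.List.pyRange 0 ((quadrant.length : Int) / 2) 1).foldl
        (pvInnerA quadrant ((quadrant.length : Int) / 2) (((quadrant.headD []).length : Int) / 2)
          ((quadrant.headD []).length : Int)) ((0 : Int), (0 : Int), (0 : Int), (0 : Int))
        = (PySem.List.pyRange 0 ((quadrant.length : Int) / 2) 1).foldl
            (fun st i => (st.1 + ((PySem.List.pyGetD quadrant i []).take
                 ((((quadrant.headD []).length : Int) / 2)).toNat).sum, st.2.1,
               st.2.2.1 + (((PySem.List.pyGetD quadrant i []).drop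
                 ((((quadrant.headD []).length : Int) / 2) + 1).toNat).take
                 (((quadrant.headD []).length : Int) - ((((quadrant.headD []).length : Int) / 2) + 1)).toNat).sum,
               st.2.2.2))
            ((0 : Int), (0 : Int), (0 : Int), (0 : Int)) := by
      apply PySem.List.foldl_congr_mem
      intro acc x hx
      rw [PySem.List.mem_pyRange_one] at hx
      obtain ⟨hp, hs⟩ := hrow x hx.1 (by omega) (by omega)
      exact pv_inner_lt quadrant _ _ _ x hx.2 (by omega) (by omega) hp hs acc
    have hsuf : ∀ init : Int × Int × Int × Int,
        (PySem.List.pyRange (((quadrant.length : Int) / 2) + 1) (quadrant.length : Int) 1).foldl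
        (pvInnerA quadrant ((quadrant.length : Int) / 2) (((quadrant.headD []).length : Int) / 2)
          ((quadrant.headD []).length : Int)) init
        = (PySem.List.pyRange (((quadrant.length : Int) / 2) + 1) (quadrant.length : Int) 1).foldl
            (fun st i => (st.1, st.2.1 + ((PySem.List.pyGetD quadrant i []).take
                 ((((quadrant.headD []).length : Int) / 2)).toNat).sum,
               st.2.2.1, st.2.2.2 + (((PySem.List.pyGetD quadrant i []).drop
                 ((((quadrant.headD []).length : Int) / 2) + 1).toNat).take
                 (((quadrant.headD []).length : Int) - ((((quadrant.headD []).length : Int) / 2) + 1)).toNat).sum))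
            init := by
      intro init
      apply PySem.List.foldl_congr_mem
      intro acc x hx
      rw [PySem.List.mem_pyRange_one] at hx
      obtain ⟨hp, hs⟩ := hrow x (by omega) hx.2 (by omega)
      exact pv_inner_gt quadrant _ _ _ x (by omega) (by omega) (by omega) hp hs acc
    rw [PySem.List.pyRange_one_append 0 ((quadrant.length : Int) / 2) (quadrant.length : Int)
          (by omega) (by omega),
        PySem.List.pyRange_one_cons (by omega : ((quadrant.length : Int) / 2) < (quadrant.length : Int)),
        List.foldl_append, List.foldl_cons, pv_inner_eq, hsuf, hpref, pv_foldl_c13, pv_foldl_c24]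
    have t1 : (PySem.List.pyRange 0 ((quadrant.length : Int) / 2) 1).map
        (fun i => PySem.List.pyGetD quadrant i []) = quadrant.take ((quadrant.length : Int) / 2).toNat := by
      have := pv_map_seg quadrant [] 0 ((quadrant.length : Int) / 2) (le_refl 0) (Or.inl (by omega))
      simpa using this
    have t2 : (PySem.List.pyRange (((quadrant.length : Int) / 2) + 1) (quadrant.length : Int) 1).map
        (fun i => PySem.List.pyGetD quadrant i [])
        = quadrant.drop (((quadrant.length : Int) / 2) + 1).toNat := by
      have := pv_map_seg quadrant [] (((quadrant.length : Int) / 2) + 1) (quadrant.length : Int)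
        (by omega) (Or.inl (by omega))
      rw [this]
      have hall : (quadrant.drop (((quadrant.length : Int) / 2) + 1).toNat).length
          ≤ ((quadrant.length : Int) - (((quadrant.length : Int) / 2) + 1)).toNat := by
        simp; omega
      exact List.take_of_length_le hall
    have u1a : (PySem.List.pyRange 0 ((quadrant.length : Int) / 2) 1).map
          (fun i => ((PySem.List.pyGetD quadrant i []).take
            ((((quadrant.headD []).length : Int) / 2)).toNat).sum)
        = (quadrant.take ((quadrant.length : Int) / 2).toNat).map
            (fun row => (row.take ((((quadrant.headD []).length : Int) / 2)).toNat).sum) := by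
      rw [← t1, List.map_map]; rfl
    have u1b : (PySem.List.pyRange 0 ((quadrant.length : Int) / 2) 1).map
          (fun i => (((PySem.List.pyGetD quadrant i []).drop
            ((((quadrant.headD []).length : Int) / 2) + 1).toNat).take
            (((quadrant.headD []).length : Int) - ((((quadrant.headD []).length : Int) / 2) + 1)).toNat).sum)
        = (quadrant.take ((quadrant.length : Int) / 2).toNat).map
            (fun row => ((row.drop ((((quadrant.headD []).length : Int) / 2) + 1).toNat).take
              (((quadrant.headD []).length : Int) - ((((quadrant.headD []).length : Int) / 2) + 1)).toNat).sum) := by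
      rw [← t1, List.map_map]; rfl
    have u2a : (PySem.List.pyRange (((quadrant.length : Int) / 2) + 1) (quadrant.length : Int) 1).map
          (fun i => ((PySem.List.pyGetD quadrant i []).take
            ((((quadrant.headD []).length : Int) / 2)).toNat).sum)
        = (quadrant.drop (((quadrant.length : Int) / 2) + 1).toNat).map
            (fun row => (row.take ((((quadrant.headD []).length : Int) / 2)).toNat).sum) := by
      rw [← t2, List.map_map]; rfl
    have u2b : (PySem.List.pyRange (((quadrant.length : Int) / 2) + 1) (quadrant.length : Int) 1).map
          (fun i => (((PySem.List.pyGetD quadrant i []).drop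
            ((((quadrant.headD []).length : Int) / 2) + 1).toNat).take
            (((quadrant.headD []).length : Int) - ((((quadrant.headD []).length : Int) / 2) + 1)).toNat).sum)
        = (quadrant.drop (((quadrant.length : Int) / 2) + 1).toNat).map
            (fun row => ((row.drop ((((quadrant.headD []).length : Int) / 2) + 1).toNat).take
              (((quadrant.headD []).length : Int) - ((((quadrant.headD []).length : Int) / 2) + 1)).toNat).sum) := by
      rw [← t2, List.map_map]; rfl
    rw [u1a, u1b, u2a, u2b]
    have hB1 : ∀ l : List (List Int),
        (l.map (fun r => (PySem.List.slice r none (some (((quadrant.headD []).length : Int) / 2))).sum))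
        = (l.map (fun row => (row.take ((((quadrant.headD []).length : Int) / 2)).toNat).sum)) := by
      intro l
      apply List.map_congr_left
      intro r _
      exact pv_row_left r _ (by omega)
    have hB2 : ∀ l : List (List Int),
        (l.map (fun r => (PySem.List.slice r none (some ((quadrant.headD []).length : Int))).sum
            - (PySem.List.slice r none (some ((((quadrant.headD []).length : Int) / 2) + 1))).sum))
        = (l.map (fun row => ((row.drop ((((quadrant.headD []).length : Int) / 2) + 1).toNat).take
            (((quadrant.headD []).length : Int) - ((((quadrant.headD []).length : Int) / 2) + 1)).toNat).sum)) := by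
      intro l
      apply List.map_congr_left
      intro r _
      exact pv_row_right r (((quadrant.headD []).length : Int) / 2) ((quadrant.headD []).length : Int)
        (by omega) (by omega)
    rw [hB1, hB1, hB2, hB2]
    ring
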